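-- pv_equiv track=rewrite | github.com/gpoesia/magicomplete | data.py | get_kept_character_indices
-- ===== SOURCE A (Python) =====
-- def get_kept_character_indices(original, short):
--     kept = []
--     i_original, i_short = 0, 0
--
--     while i_short < len(short) and i_original < len(original):
--         if short[i_short] == original[i_original]:
--             kept.append(i_original)
--             i_short += 1
--
--         i_original += 1
--
--     return kept
-- ===== SOURCE B (Python) =====
-- def get_kept_character_indices(original, short):
--     # Build a positions index once, then answer each character of short
--     # by binary-searching its (sorted) position list for the first
--     # position >= start; stop when a character has no position left.
--     index = {}
--     for i, c in enumerate(original):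
--         index.setdefault(c, []).append(i)
--
--     kept = []
--     start = 0
--     for c in short:
--         ps = index.get(c, [])
--         if not ps or ps[-1] < start:
--             break
--         lo, hi = 0, len(ps)
--         while lo < hi:
--             mid = (lo + hi) // 2
--             if ps[mid] < start:
--                 lo = mid + 1
--             else:
--                 hi = mid
--         p = ps[lo]
--         kept.append(p)
--         start = p + 1
--     return kept
-- ===== Notes on version B (the rewrite author's own statement) =====
-- stated objective: alternative
-- what changed: B replaces A's single two-pointer scan of original by a precomputed per-character positions index (dict built in one pass) queried with a hand-written binary search for the first position >= start, so original is never rescanned per character of short.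
import Mathlib
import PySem

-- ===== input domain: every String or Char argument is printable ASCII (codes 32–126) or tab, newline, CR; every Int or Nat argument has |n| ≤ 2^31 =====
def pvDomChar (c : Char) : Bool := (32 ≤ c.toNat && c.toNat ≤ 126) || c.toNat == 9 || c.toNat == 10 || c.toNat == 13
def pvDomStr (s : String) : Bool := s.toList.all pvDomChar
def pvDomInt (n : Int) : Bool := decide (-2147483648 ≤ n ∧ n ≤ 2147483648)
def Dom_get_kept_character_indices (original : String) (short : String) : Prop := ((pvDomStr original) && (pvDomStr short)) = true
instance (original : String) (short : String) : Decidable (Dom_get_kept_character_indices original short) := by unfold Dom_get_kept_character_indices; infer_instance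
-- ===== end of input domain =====

-- B replaces A's two-pointer scan of original by a per-character positions index
-- (a dict built in one pass) queried with a binary search for the first position
-- ≥ start; an alternative algorithm of similar cost, not claimed faster.

-- ===== PORT A =====
-- A's while loop: i_original walks original one char at a time, i_short advances on a match;
-- here the walked suffix of original is the recursion structure and i is i_original.
def pvLoopA : List Char → List Char → Nat → List Int
  | _, [], _ => []
  | [], _ :: _, _ => []
  | o :: os, s :: ss, i =>
    if s == o then (i : Int) :: pvLoopA os ss (i + 1)
    else pvLoopA os (s :: ss) (i + 1)

def get_kept_character_indices (original : String) (short : String) : List Int :=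
  pvLoopA original.toList short.toList 0

-- ===== PORT B =====
-- index.setdefault(c, []).append(i) over enumerate(original)
def pvIndex (l : List Char) : PySem.Dict Char (List Int) :=
  (PySem.List.enumerate l).foldl (fun d p => d.modify p.2 [] (· ++ [p.1])) PySem.Dict.empty

-- the hand-written 'while lo < hi' binary search of Source B, step for step
def pvBSearch (ps : List Int) (start : Int) (lo hi : Nat) : Nat :=
  if lo < hi then
    let mid := (lo + hi) / 2
    if ps.getD mid 0 < start then pvBSearch ps start (mid + 1) hi
    else pvBSearch ps start lo mid
  else lo
termination_by hi - lo
decreasing_by all_goals omega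

-- the 'for c in short' loop: 'break' is modelled by returning [] (kept is the prefix built so far);
-- ps = index.get(c, []) is getD, ps[-1] is pyGetD ps (-1) 0 (ps nonempty on that branch)
def pvLoopB (idx : PySem.Dict Char (List Int)) : List Char → Int → List Int
  | [], _ => []
  | c :: cs, start =>
    let ps := idx.getD c []
    if ps = [] ∨ PySem.List.pyGetD ps (-1) 0 < start then []
    else
      let lo := pvBSearch ps start 0 ps.length
      let p := ps.getD lo 0
      p :: pvLoopB idx cs (p + 1)

def get_kept_character_indices_alt (original : String) (short : String) : List Int :=
  pvLoopB (pvIndex original.toList) short.toList 0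

-- ===== PRECONDITION & SPEC =====
def Spec_get_kept_character_indices (original : String) (short : String) (out : List Int) : Prop := out = get_kept_character_indices_alt original short
instance (original : String) (short : String) (out : List Int) : Decidable (Spec_get_kept_character_indices original short out) := by unfold Spec_get_kept_character_indices; infer_instance

-- ===== CLAIM (what is proved, stated in full; the proofs are below) =====
def Claim_equal_get_kept_character_indices : Prop := ∀ (original : String) (short : String), Dom_get_kept_character_indices original short → Spec_get_kept_character_indices original short (get_kept_character_indices original short)

-- ===== LEMMAS AND PROOFS =====
def posFrom (c : Char) : List Char → Int → List Int
  | [], _ => []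
  | x :: xs, i => (if x == c then [i] else []) ++ posFrom c xs (i + 1)

theorem pvEnumPos (c : Char) (l : List Char) : ∀ (i : Int),
    (((PySem.List.enumerate l i).map Prod.swap).filter (fun p => p.1 == c)).map (·.2) = posFrom c l i := by
  induction l with
  | nil => intro i; simp [PySem.List.enumerate_nil, posFrom]
  | cons x xs ih => intro i; by_cases h : x == c <;> simp [PySem.List.enumerate_cons, posFrom, h, ih]
-- A-side: the find-based formulation of A's scan, the bridge between the two loops
def pvFindFrom (full : List Char) (c : Char) (start : Nat) : Option Nat :=
  ((full.drop start).findIdx? (· == c)).map (· + start)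

def pvLoopF (full : List Char) : List Char → Nat → List Int
  | [], _ => []
  | c :: cs, start =>
    match pvFindFrom full c start with
    | none => []
    | some p => (p : Int) :: pvLoopF full cs (p + 1)
theorem pvDropSucc (full : List Char) (start : Nat) (o : Char) (os : List Char)
    (h : full.drop start = o :: os) : full.drop (start + 1) = os := by
  rw [← List.tail_drop, h]
  rfl

theorem pvFindFrom_skip (full : List Char) (c o : Char) (os : List Char) (start : Nat)
    (h : full.drop start = o :: os) (hne : (o == c) = false) :
    pvFindFrom full c start = pvFindFrom full c (start + 1) := by
  have hdrop := pvDropSucc full start o os h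
  simp only [pvFindFrom, h, hdrop, List.findIdx?_cons, hne]
  cases List.findIdx? (fun x => x == c) os
  · simp
  · simp; omega

theorem pvLoopAF_eq (os : List Char) : ∀ (s full : List Char) (start : Nat),
    full.drop start = os → pvLoopA os s start = pvLoopF full s start := by
  induction os with
  | nil =>
    intro s full start h
    cases s with
    | nil => simp [pvLoopA, pvLoopF]
    | cons c cs => simp [pvLoopA, pvLoopF, pvFindFrom, h]
  | cons o os' ih =>
    intro s full start h
    cases s with
    | nil => simp [pvLoopA, pvLoopF]
    | cons c cs =>
      have hdrop := pvDropSucc full start o os' h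
      by_cases hco : (c == o) = true
      · have hoc : (o == c) = true := by
          rw [beq_iff_eq] at hco ⊢
          exact hco.symm
        have hfind : pvFindFrom full c start = some start := by
          simp [pvFindFrom, h, List.findIdx?_cons, hoc]
        simp [pvLoopA, pvLoopF, hco, hfind, ih cs full (start + 1) hdrop]
      · have hco2 : (c == o) = false := by simpa using hco
        have hoc : (o == c) = false := by
          rw [beq_eq_false_iff_ne] at hco2 ⊢
          exact fun e => hco2 e.symm
        have hskip := pvFindFrom_skip full c o os' start h hoc
        rw [show pvLoopA (o :: os') (c :: cs) start
              = pvLoopA os' (c :: cs) (start + 1) by simp [pvLoopA, hco2],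
            ih (c :: cs) full (start + 1) hdrop]
        simp only [pvLoopF, hskip]
theorem pvIndex_getD (l : List Char) (c : Char) :
    (pvIndex l).getD c [] = posFrom c l 0 := by
  have h : pvIndex l = ((PySem.List.enumerate l).map Prod.swap).foldl
      (fun d p => d.modify p.1 [] (· ++ [p.2])) PySem.Dict.empty := by
    rw [List.foldl_map]
    rfl
  rw [h, PySem.Dict.getD_foldl_modify_append, PySem.Dict.getD_empty]
  simpa using pvEnumPos c l 0

theorem posFrom_bounds (c : Char) (l : List Char) : ∀ (i p : Int), p ∈ posFrom c l i →
    i ≤ p ∧ p < i + l.length := by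
  induction l with
  | nil => intro i p hp; simp [posFrom] at hp
  | cons x xs ih =>
    intro i p hp
    simp only [posFrom, List.mem_append] at hp
    rcases hp with hp | hp
    · by_cases h : x == c <;> simp [h] at hp
      subst hp; simp only [List.length_cons]; push_cast; omega
    · have := ih (i + 1) p hp; simp at this ⊢; omega

theorem posFrom_pairwise (c : Char) (l : List Char) : ∀ (i : Int),
    (posFrom c l i).Pairwise (· < ·) := by
  induction l with
  | nil => intro i; simp [posFrom]
  | cons x xs ih =>
    intro i
    simp only [posFrom]
    by_cases h : x == c
    · simp only [h, if_pos]
      refine List.Pairwise.cons ?_ (ih (i + 1))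
      intro p hp; have := posFrom_bounds c xs (i + 1) p hp; omega
    · simp [h, ih (i + 1)]

theorem posFrom_split (c : Char) : ∀ (s : Nat) (l : List Char) (i : Int),
    posFrom c l i = posFrom c (l.take s) i ++ posFrom c (l.drop s) (i + s) := by
  intro s
  induction s with
  | zero => intro l i; simp [posFrom]
  | succ s ih =>
    intro l i
    cases l with
    | nil => simp [posFrom]
    | cons x xs =>
      simp only [List.take_succ_cons, List.drop_succ_cons, posFrom, List.append_assoc]
      rw [ih xs (i + 1)]
      have : i + 1 + (s : Int) = i + ((s : Nat) + 1 : Nat) := by push_cast; ring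
      rw [this]

theorem posFrom_head (c : Char) (l : List Char) : ∀ (i : Int),
    (posFrom c l i).head? = (List.findIdx? (· == c) l).map (fun k => i + (k : Int)) := by
  induction l with
  | nil => intro i; simp [posFrom]
  | cons x xs ih =>
    intro i
    by_cases h : x == c
    · simp [posFrom, h, List.findIdx?_cons]
    · simp only [posFrom, h, if_neg, Bool.false_eq_true, not_false_iff, List.nil_append,
        List.findIdx?_cons, ih (i + 1)]
      simp
      cases List.findIdx? (· == c) xs
      · simp
      · simp [Int.add_comm, Int.add_left_comm]
theorem bs_spec (ps : List Int) (start : Int)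
    (hsort : ∀ i j, i < j → j < ps.length → ps.getD i 0 < ps.getD j 0) :
    ∀ (n lo hi : Nat), hi - lo ≤ n → lo ≤ hi → hi ≤ ps.length →
    (∀ j, j < lo → ps.getD j 0 < start) →
    (∀ j, hi ≤ j → j < ps.length → start ≤ ps.getD j 0) →
    pvBSearch ps start lo hi ≤ ps.length ∧
    (∀ j, j < pvBSearch ps start lo hi → ps.getD j 0 < start) ∧
    (∀ j, pvBSearch ps start lo hi ≤ j → j < ps.length → start ≤ ps.getD j 0) := by
  intro n
  induction n with
  | zero =>
    intro lo hi hn hle hhi hlo hge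
    have heq : lo = hi := by omega
    rw [pvBSearch, if_neg (by omega)]
    exact ⟨by omega, hlo, fun j hj hjl => hge j (by omega) hjl⟩
  | succ n ih =>
    intro lo hi hn hle hhi hlo hge
    by_cases hlt : lo < hi
    · rw [pvBSearch, if_pos hlt]
      simp only
      by_cases hmid : ps.getD ((lo + hi) / 2) 0 < start
      · rw [if_pos hmid]
        refine ih ((lo + hi) / 2 + 1) hi (by omega) (by omega) hhi ?_ hge
        intro j hj
        rcases Nat.lt_or_ge j ((lo + hi) / 2) with h | h
        · exact lt_trans (hsort j ((lo + hi) / 2) h (by omega)) hmid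
        · have : j = (lo + hi) / 2 := by omega
          rw [this]; exact hmid
      · rw [if_neg hmid]
        refine ih lo ((lo + hi) / 2) (by omega) (by omega) (by omega) hlo ?_
        intro j hj hjl
        rcases Nat.lt_or_ge ((lo + hi) / 2) j with h | h
        · exact le_of_lt (lt_of_le_of_lt (le_of_not_gt hmid) (hsort _ j h hjl))
        · have : j = (lo + hi) / 2 := by omega
          rw [this]; exact le_of_not_gt hmid
    · rw [pvBSearch, if_neg hlt]
      have heq : lo = hi := by omega
      exact ⟨by omega, hlo, fun j hj hjl => hge j (by omega) hjl⟩
theorem sorted_getD (ps : List Int) (h : ps.Pairwise (· < ·)) :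
    ∀ i j, i < j → j < ps.length → ps.getD i 0 < ps.getD j 0 := by
  intro i j hij hj
  rw [List.getD_eq_getElem ps 0 (by omega), List.getD_eq_getElem ps 0 hj]
  exact List.pairwise_iff_getElem.mp h i j (by omega) hj hij
theorem pvLoopFB_eq (full : List Char) (s : List Char) : ∀ (start : Nat),
    pvLoopF full s start = pvLoopB (pvIndex full) s (start : Int) := by
  induction s with
  | nil => intro start; simp [pvLoopF, pvLoopB]
  | cons c cs ih =>
    intro start
    have hps : (pvIndex full).getD c [] = posFrom c full 0 := pvIndex_getD full c
    have hsplit := posFrom_split c start full 0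
    simp only [zero_add] at hsplit
    set T := posFrom c (full.take start) 0 with hT
    set D := posFrom c (full.drop start) (start : Int) with hDdef
    have hTlt : ∀ p ∈ T, p < (start : Int) := by
      intro p hp
      have h1 := posFrom_bounds c (full.take start) 0 p hp
      have h2 : (full.take start).length ≤ start := by
        simp [List.length_take]
      omega
    have hDge : ∀ p ∈ D, (start : Int) ≤ p :=
      fun p hp => (posFrom_bounds c (full.drop start) (start : Int) p hp).1
    cases hf : pvFindFrom full c start with
    | none =>
      have hfind : (full.drop start).findIdx? (· == c) = none := by
        simpa [pvFindFrom, Option.map_eq_none_iff] using hf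
      have hDnil : D = [] := by
        have hh := posFrom_head c (full.drop start) (start : Int)
        rw [hfind] at hh
        simpa using hh
      have hpsT : (pvIndex full).getD c [] = T := by
        rw [hps, hsplit, hDnil, List.append_nil]
      simp only [pvLoopF, hf, pvLoopB, hpsT]
      rcases eq_or_ne T [] with h | h
      · rw [if_pos (Or.inl h)]
      · rw [if_pos (Or.inr (by
          rw [PySem.List.pyGetD_neg_one T 0 h]
          exact hTlt _ (List.getLast_mem h)))]
    | some p =>
      obtain ⟨k, hk, hpk⟩ : ∃ k, (full.drop start).findIdx? (· == c) = some k ∧ p = k + start := by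
        simp only [pvFindFrom, Option.map_eq_some_iff] at hf
        obtain ⟨k, h1, h2⟩ := hf
        exact ⟨k, h1, h2.symm⟩
      have hheadD : D.head? = some ((start : Int) + k) := by
        rw [hDdef, posFrom_head, hk]; rfl
      obtain ⟨D', hD'⟩ : ∃ D', D = ((start : Int) + k) :: D' := by
        cases hDc : D with
        | nil => rw [hDc] at hheadD; simp at hheadD
        | cons a D' =>
          rw [hDc] at hheadD; simp at hheadD
          exact ⟨D', by rw [hheadD]⟩
      have hDne : D ≠ [] := by rw [hD']; simp
      have hpsTD : (pvIndex full).getD c [] = T ++ D := by rw [hps, hsplit]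
      have hne : T ++ D ≠ [] := by simp [hD']
      have hguard : ¬ (T ++ D = [] ∨ PySem.List.pyGetD (T ++ D) (-1) 0 < (start : Int)) := by
        rintro (h | h)
        · exact hne h
        · refine absurd h (not_lt.mpr ?_)
          rw [PySem.List.pyGetD_neg_one (T ++ D) 0 hne, List.getLast_append_of_ne_nil hne hDne]
          exact hDge _ (List.getLast_mem hDne)
      simp only [pvLoopF, hf, pvLoopB, hpsTD]
      rw [if_neg hguard]
      have hpair : (T ++ D).Pairwise (· < ·) := by
        rw [← hsplit]; exact posFrom_pairwise c full 0
      have hsort := sorted_getD (T ++ D) hpair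
      obtain ⟨hr1, hr2, hr3⟩ := bs_spec (T ++ D) (start : Int) hsort (T ++ D).length 0
        (T ++ D).length (by omega) (by omega) (le_refl _)
        (fun j hj => absurd hj (Nat.not_lt_zero j))
        (fun j hj hjl => absurd hjl (by omega))
      set r := pvBSearch (T ++ D) (start : Int) 0 (T ++ D).length with hr
      have hTj : ∀ j, j < T.length → (T ++ D).getD j 0 < (start : Int) := by
        intro j hj
        rw [List.getD_append T D 0 j hj]
        exact hTlt _ (by rw [List.getD_eq_getElem T 0 hj]; exact List.getElem_mem hj)
      have hmidv : (T ++ D).getD T.length 0 = (start : Int) + k := by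
        rw [List.getD_append_right T D 0 T.length (le_refl _), hD']
        simp
      have hlen : T.length < (T ++ D).length := by
        rw [hD']; simp
      have hreq : r = T.length := by
        rcases Nat.lt_trichotomy r T.length with h | h | h
        · exact absurd (hr3 r (le_refl r) (by omega)) (not_le.mpr (hTj r h))
        · exact h
        · exact absurd (hr2 T.length h) (not_lt.mpr (by rw [hmidv]; omega))
      have hval : (T ++ D).getD r 0 = (start : Int) + k := by rw [hreq, hmidv]
      rw [hval, ih (p + 1)]
      congr 1
      · push_cast [hpk]; ring
      · push_cast [hpk]; ring_nf

-- ===== VERDICT (by name: the statement is the Claim_ definition above) =====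
theorem get_kept_character_indices_spec : Claim_equal_get_kept_character_indices := by
  intro original short _
  unfold Spec_get_kept_character_indices get_kept_character_indices get_kept_character_indices_alt
  rw [pvLoopAF_eq original.toList short.toList original.toList 0 (by simp)]
  exact pvLoopFB_eq original.toList short.toList 0
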